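-- pv_equiv track=rewrite | github.com/MrHen/movie-sorter | sorter.py | find_comparison_loops
-- ===== SOURCE A (Python) =====
-- def find_comparison_loops(comparisons, curr_key, path=None, max_depth=10):
--     loops = []
--     if max_depth <= 0:
--         return loops
--     path = path or tuple()
--     path = (*path, curr_key,)
--     next_keys = comparisons.get(curr_key, [])
--     for next_key in next_keys:
--         if next_key == path[0]:
--             loops.append((*path, next_key,))
--         else:
--             loops.extend(find_comparison_loops(
--                 comparisons,
--                 next_key,
--                 path=tuple(path),
--                 max_depth=max_depth-1,
--             ))
--     return loops
-- ===== SOURCE B (Python) =====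
-- def find_comparison_loops(comparisons, curr_key, path=None, max_depth=10):
--     loops = []
--     stack = [("expand", curr_key, tuple(path or ()), max_depth)]
--     while stack:
--         item = stack.pop()
--         if item[0] == "emit":
--             loops.append(item[1])
--             continue
--         _, key, prefix, depth = item
--         if depth <= 0:
--             continue
--         prefix = (*prefix, key)
--         children = []
--         for next_key in comparisons.get(key, []):
--             if next_key == prefix[0]:
--                 children.append(("emit", (*prefix, next_key)))
--             else:
--                 children.append(("expand", next_key, prefix, depth - 1))
--         stack.extend(reversed(children))
--     return loops
-- ===== Notes on version B (the rewrite author's own statement) =====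
-- stated objective: alternative
-- what changed: Replaces A's recursive DFS (which concatenates the result lists of recursive calls) by an iterative traversal driven by an explicit stack of expand/emit work items, children pushed in reverse so loops are appended to a single result list in the same pre-order.
import Mathlib
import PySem

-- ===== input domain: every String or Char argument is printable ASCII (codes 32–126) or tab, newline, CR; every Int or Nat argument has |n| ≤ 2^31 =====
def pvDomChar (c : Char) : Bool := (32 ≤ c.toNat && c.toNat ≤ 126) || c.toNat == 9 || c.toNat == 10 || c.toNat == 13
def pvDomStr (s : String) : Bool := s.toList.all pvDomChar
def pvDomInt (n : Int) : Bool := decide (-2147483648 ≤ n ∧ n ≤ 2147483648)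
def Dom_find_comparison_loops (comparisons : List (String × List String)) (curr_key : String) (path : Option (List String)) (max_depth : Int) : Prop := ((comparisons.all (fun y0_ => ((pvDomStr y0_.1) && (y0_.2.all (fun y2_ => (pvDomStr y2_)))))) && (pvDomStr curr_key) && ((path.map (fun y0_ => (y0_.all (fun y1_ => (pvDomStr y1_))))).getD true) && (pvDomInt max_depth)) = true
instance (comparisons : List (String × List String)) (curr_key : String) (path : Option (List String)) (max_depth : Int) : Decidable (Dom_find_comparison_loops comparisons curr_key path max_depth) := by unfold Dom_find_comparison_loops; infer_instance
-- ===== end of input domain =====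

-- B replaces A's recursive DFS by an iterative traversal over an explicit stack of expand/emit
-- work items (objective: alternative decomposition, same cost); the return value is identical.

-- ===== PORT A =====
-- Literal port of A's recursive DFS. `path or tuple()` is `path.getD []` (None and the empty
-- tuple both yield ()); `path[0]` is `headD ""`, exact because path is nonempty there;
-- `comparisons.get(curr_key, [])` is PySem.Dict lookup on the dict built from the items.
def find_comparison_loops (comparisons : List (String × List String)) (curr_key : String) (path : Option (List String)) (max_depth : Int) : List (List String) :=
  if _h : max_depth ≤ 0 then []
  else
    let path1 := path.getD []
    let path2 := path1 ++ [curr_key]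
    let next_keys := (PySem.Dict.ofList comparisons).getD curr_key []
    next_keys.foldl
      (fun loops next_key =>
        if next_key == path2.headD "" then loops ++ [path2 ++ [next_key]]
        else loops ++ find_comparison_loops comparisons next_key (some path2) (max_depth - 1))
      []
termination_by max_depth.toNat
decreasing_by simp_wf; omega

-- ===== PORT B =====
-- B's work items: expand a key under a path prefix with remaining depth, or emit a finished loop.
inductive PvItem : Type
  | expand : String → List String → Int → PvItem
  | emit : List String → PvItem
deriving DecidableEq, Repr

-- termination measure for the stack loop (proof device only; B's Python needs none)
def pvItemWeight (L : Nat) : PvItem → Nat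
  | .emit _ => 1
  | .expand _ _ d => (L + 2) ^ d.toNat

def pvValSum (comparisons : List (String × List String)) : Nat :=
  (comparisons.map (fun p => p.2.length)).sum

-- every value stored in the dict built from `comparisons` is one of the listed values
theorem pvDict_items_bound {L : Nat} (d : PySem.Dict String (List String)) (ps : List (String × List String))
    (hd : ∀ p ∈ d.items, p.2.length ≤ L) (hps : ∀ p ∈ ps, p.2.length ≤ L) :
    ∀ p ∈ (d.update ps).items, p.2.length ≤ L := by
  induction ps generalizing d with
  | nil => simpa [PySem.Dict.update] using hd
  | cons q qs ih =>
      have hq : q.2.length ≤ L := hps q (by simp)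
      have hins : ∀ p ∈ (d.insert q.1 q.2).items, p.2.length ≤ L := by
        intro p hp
        simp only [PySem.Dict.insert] at hp
        split at hp
        · simp only [List.mem_map] at hp
          obtain ⟨r, hr, hrp⟩ := hp
          by_cases hb : (r.1 == q.1) = true
          · simp [hb] at hrp; subst hrp; exact hq
          · simp [hb] at hrp; subst hrp; exact hd r hr
        · rcases List.mem_append.mp hp with h | h
          · exact hd p h
          · simp at h; subst h; exact hq
      have : (d.update (q :: qs)) = (d.insert q.1 q.2).update qs := by
        simp [PySem.Dict.update]
      rw [this]
      exact ih _ hins (fun p hp => hps p (by simp [hp]))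

theorem pvGetD_length_le (comparisons : List (String × List String)) (k : String) :
    ((PySem.Dict.ofList comparisons).getD k []).length ≤ pvValSum comparisons := by
  have hall : ∀ p ∈ (PySem.Dict.ofList comparisons).items, p.2.length ≤ pvValSum comparisons := by
    apply pvDict_items_bound (d := PySem.Dict.empty)
    · intro p hp; simp [PySem.Dict.empty] at hp
    · intro p hp
      have : p.2.length ∈ comparisons.map (fun q => q.2.length) := List.mem_map_of_mem hp
      exact List.le_sum_of_mem this
  simp only [PySem.Dict.getD, PySem.Dict.get?]
  cases hfind : List.find? (fun p => p.1 == k) (PySem.Dict.ofList comparisons).items with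
  | none => simp
  | some p =>
      have := hall p (List.mem_of_find?_eq_some hfind)
      simpa using this

-- the children pushed for one expand item weigh strictly less than the item itself
theorem pvChildren_weight_lt (comparisons : List (String × List String)) (key : String)
    (p2 : List String) (hd : String) (d : Int) (hpos : ¬ d ≤ 0) :
    ((((PySem.Dict.ofList comparisons).getD key []).map (fun nk =>
        if nk == hd then PvItem.emit (p2 ++ [nk]) else PvItem.expand nk p2 (d - 1))).map
      (pvItemWeight (pvValSum comparisons))).sum < (pvValSum comparisons + 2) ^ d.toNat := by
  set L := pvValSum comparisons with hL
  set ks := (PySem.Dict.ofList comparisons).getD key [] with hks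
  have hlen : ks.length ≤ L := pvGetD_length_le comparisons key
  have hone : ∀ w ∈ (ks.map (fun nk =>
      if nk == hd then PvItem.emit (p2 ++ [nk]) else PvItem.expand nk p2 (d - 1))).map
      (pvItemWeight L), w ≤ (L + 2) ^ (d.toNat - 1) := by
    intro w hw
    simp only [List.map_map, List.mem_map] at hw
    obtain ⟨nk, _, hwk⟩ := hw
    subst hwk
    simp only [Function.comp]
    split
    · simp only [pvItemWeight]
      exact Nat.one_le_pow _ _ (by omega)
    · simp only [pvItemWeight]
      have : (d - 1).toNat = d.toNat - 1 := by omega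
      rw [this]
  have hsum := List.sum_le_card_nsmul ((ks.map (fun nk =>
      if nk == hd then PvItem.emit (p2 ++ [nk]) else PvItem.expand nk p2 (d - 1))).map
      (pvItemWeight L)) ((L + 2) ^ (d.toNat - 1)) hone
  simp only [List.length_map, smul_eq_mul] at hsum
  calc ((ks.map (fun nk =>
          if nk == hd then PvItem.emit (p2 ++ [nk]) else PvItem.expand nk p2 (d - 1))).map
        (pvItemWeight L)).sum
      ≤ ks.length * (L + 2) ^ (d.toNat - 1) := hsum
    _ ≤ L * (L + 2) ^ (d.toNat - 1) := Nat.mul_le_mul_right _ hlen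
    _ < (L + 2) * (L + 2) ^ (d.toNat - 1) :=
        (Nat.mul_lt_mul_right (Nat.pow_pos (show 0 < L + 2 by omega))).mpr (by omega)
    _ = (L + 2) ^ d.toNat := by
        rw [← pow_succ']
        congr 1
        omega

-- the stack loop of B: pop the top item; emit appends a loop, expand pushes its children
def pvRunStack (comparisons : List (String × List String)) (stack : List PvItem)
    (loops : List (List String)) : List (List String) :=
  match stack with
  | [] => loops
  | .emit t :: rest => pvRunStack comparisons rest (loops ++ [t])
  | .expand key prefixp d :: rest =>
      if _hpos : d ≤ 0 then pvRunStack comparisons rest loops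
      else
        let p2 := prefixp ++ [key]
        let children := ((PySem.Dict.ofList comparisons).getD key []).map (fun nk =>
          if nk == p2.headD "" then PvItem.emit (p2 ++ [nk]) else PvItem.expand nk p2 (d - 1))
        pvRunStack comparisons (children ++ rest) loops
termination_by (stack.map (pvItemWeight (pvValSum comparisons))).sum
decreasing_by
  all_goals simp only [List.map_cons, List.map_append, List.sum_cons, List.sum_append, pvItemWeight, dite_eq_ite]
  · omega
  · have := Nat.pow_pos (n := d.toNat) (show 0 < pvValSum comparisons + 2 by omega)
    omega
  · have := pvChildren_weight_lt comparisons key (prefixp ++ [key]) ((prefixp ++ [key]).headD "") d _hpos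
    omega

def find_comparison_loops_alt (comparisons : List (String × List String)) (curr_key : String)
    (path : Option (List String)) (max_depth : Int) : List (List String) :=
  pvRunStack comparisons [PvItem.expand curr_key (path.getD []) max_depth] []

-- ===== PRECONDITION & SPEC =====
def Spec_find_comparison_loops (comparisons : List (String × List String)) (curr_key : String) (path : Option (List String)) (max_depth : Int) (out : List (List String)) : Prop := out = find_comparison_loops_alt comparisons curr_key path max_depth
instance (comparisons : List (String × List String)) (curr_key : String) (path : Option (List String)) (max_depth : Int) (out : List (List String)) : Decidable (Spec_find_comparison_loops comparisons curr_key path max_depth out) := by unfold Spec_find_comparison_loops; infer_instance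

-- ===== CLAIM (what is proved, stated in full; the proofs are below) =====
def Claim_equal_find_comparison_loops : Prop := ∀ (comparisons : List (String × List String)) (curr_key : String) (path : Option (List String)) (max_depth : Int), Dom_find_comparison_loops comparisons curr_key path max_depth → Spec_find_comparison_loops comparisons curr_key path max_depth (find_comparison_loops comparisons curr_key path max_depth)

-- ===== LEMMAS AND PROOFS =====

-- denotation of a single work item: what processing it (alone) contributes to the result
def pvSem (comparisons : List (String × List String)) : PvItem → List (List String)
  | .emit t => [t]
  | .expand k p d => find_comparison_loops comparisons k (some p) d

theorem pvFoldl_if_append {α β : Type} (l : List α) (p : α → Bool) (f g : α → List β)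
    (acc : List β) :
    l.foldl (fun acc x => if p x then acc ++ f x else acc ++ g x) acc
      = acc ++ l.flatMap (fun x => if p x then f x else g x) := by
  induction l generalizing acc with
  | nil => simp
  | cons x xs ih =>
      simp only [List.foldl_cons, List.flatMap_cons, ih]
      split <;> simp

-- unfolding A once, as a flatMap over the next keys
theorem pvA_unfold (comparisons : List (String × List String)) (curr_key : String)
    (path : Option (List String)) (max_depth : Int) (hpos : ¬ max_depth ≤ 0) :
    find_comparison_loops comparisons curr_key path max_depth
      = ((PySem.Dict.ofList comparisons).getD curr_key []).flatMap (fun nk =>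
          if nk == ((path.getD []) ++ [curr_key]).headD ""
          then [((path.getD []) ++ [curr_key]) ++ [nk]]
          else find_comparison_loops comparisons nk (some ((path.getD []) ++ [curr_key])) (max_depth - 1)) := by
  rw [find_comparison_loops]
  rw [dif_neg hpos]
  exact pvFoldl_if_append _ _ _ _ _

theorem pvRunStack_eq_flatMap (comparisons : List (String × List String)) (stack : List PvItem)
    (loops : List (List String)) :
    pvRunStack comparisons stack loops = loops ++ stack.flatMap (pvSem comparisons) := by
  induction stack, loops using pvRunStack.induct comparisons with
  | case1 loops => simp [pvRunStack]
  | case2 loops t rest ih =>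
      rw [pvRunStack, ih]
      simp [pvSem]
  | case3 loops key prefixp d rest hpos ih =>
      rw [pvRunStack]
      rw [dif_pos hpos, ih]
      have hnil : pvSem comparisons (.expand key prefixp d) = [] := by
        simp only [pvSem]
        rw [find_comparison_loops]
        rw [dif_pos hpos]
      simp [hnil]
  | case4 loops key prefixp d rest hpos p2 children ih =>
      simp only [children, p2] at ih
      rw [pvRunStack]
      rw [dif_neg hpos]
      simp only [dite_eq_ite] at ih ⊢
      rw [ih]
      have hfun : (fun nk => pvSem comparisons
            (if nk == ((prefixp ++ [key]).headD "") then PvItem.emit ((prefixp ++ [key]) ++ [nk])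
             else PvItem.expand nk (prefixp ++ [key]) (d - 1)))
          = (fun nk =>
              if nk == ((prefixp ++ [key]).headD "")
              then [((prefixp ++ [key]) ++ [nk])]
              else find_comparison_loops comparisons nk (some (prefixp ++ [key])) (d - 1)) := by
        funext nk
        split <;> simp [pvSem]
      have hexp : pvSem comparisons (.expand key prefixp d)
          = (((PySem.Dict.ofList comparisons).getD key []).map (fun nk =>
              if nk == ((prefixp ++ [key]).headD "") then PvItem.emit ((prefixp ++ [key]) ++ [nk])
              else PvItem.expand nk (prefixp ++ [key]) (d - 1))).flatMap (pvSem comparisons) := by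
        simp only [pvSem]
        rw [pvA_unfold comparisons key (some prefixp) d hpos]
        simp only [Option.getD_some, List.flatMap_map, hfun]
      simp only [List.flatMap_append, List.flatMap_cons, List.append_assoc, hexp]

-- A normalizes its path argument to `path.getD []` before anything else
theorem pvA_path_norm (comparisons : List (String × List String)) (curr_key : String)
    (path : Option (List String)) (max_depth : Int) :
    find_comparison_loops comparisons curr_key path max_depth
      = find_comparison_loops comparisons curr_key (some (path.getD [])) max_depth := by
  by_cases hpos : max_depth ≤ 0
  · rw [find_comparison_loops, find_comparison_loops]
    rw [dif_pos hpos, dif_pos hpos]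
  · rw [pvA_unfold _ _ _ _ hpos, pvA_unfold _ _ _ _ hpos]
    simp

-- ===== VERDICT (by name: the statement is the Claim_ definition above) =====
theorem find_comparison_loops_spec : Claim_equal_find_comparison_loops := by
  intro comparisons curr_key path max_depth _
  unfold Spec_find_comparison_loops find_comparison_loops_alt
  rw [pvRunStack_eq_flatMap]
  simp only [List.flatMap_cons, List.flatMap_nil, List.nil_append, List.append_nil]
  simp only [pvSem]
  exact pvA_path_norm comparisons curr_key path max_depth
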